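-- pv_equiv track=rewrite | github.com/NVishnevskaya/e-books_formatter | style_render.py | insert_tag_to_css
-- ===== SOURCE A (Python) =====
-- def insert_tag_to_css(css_dict, enclosure=False, font_size=16):
--     if enclosure:
--         pass
--     else:
--         if 'p' in css_dict.keys():
--             needed_indexes = tuple(
--                 filter(lambda x: 'font-size' in css_dict['p'][x], [index for index in range(len(css_dict['p']))]))
--             for index in needed_indexes:
--                 css_dict['p'][index] = ""
--             css_dict['p'] = list(filter(lambda x: x.strip() != "", css_dict['p']))
--             css_dict['p'].append(f'font-size: {font_size}px;')
--         else:
--             css_dict['p'] = []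
--             css_dict['p'].append(f'font-size: {font_size}px;')
--     return css_dict
-- ===== SOURCE B (Python) =====
-- def insert_tag_to_css(css_dict, enclosure=False, font_size=16):
--     # Recursive build-back-to-front: the new tag is produced at the recursion
--     # base, survivors are cons-prepended on the way out of the recursion.
--     if enclosure:
--         return css_dict
--     def rebuild(entries):
--         if not entries:
--             return [f'font-size: {font_size}px;']
--         head = entries[0]
--         rest = rebuild(entries[1:])
--         if 'font-size' in head or head.strip() == "":
--             return rest
--         return [head] + rest
--     css_dict['p'] = rebuild(css_dict.get('p', []))
--     return css_dict
-- ===== Notes on version B (the rewrite author's own statement) =====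
-- stated objective: alternative
-- what changed: A's three staged passes over css_dict['p'] (build an index tuple of font-size entries, blank them in place, re-filter blanks, then append) are replaced by one structural recursion that builds the new 'p' list back-to-front, emitting the new tag at the recursion base and cons-prepending surviving entries on the way out; the key-absent branch is merged via the get default.
import Mathlib
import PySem

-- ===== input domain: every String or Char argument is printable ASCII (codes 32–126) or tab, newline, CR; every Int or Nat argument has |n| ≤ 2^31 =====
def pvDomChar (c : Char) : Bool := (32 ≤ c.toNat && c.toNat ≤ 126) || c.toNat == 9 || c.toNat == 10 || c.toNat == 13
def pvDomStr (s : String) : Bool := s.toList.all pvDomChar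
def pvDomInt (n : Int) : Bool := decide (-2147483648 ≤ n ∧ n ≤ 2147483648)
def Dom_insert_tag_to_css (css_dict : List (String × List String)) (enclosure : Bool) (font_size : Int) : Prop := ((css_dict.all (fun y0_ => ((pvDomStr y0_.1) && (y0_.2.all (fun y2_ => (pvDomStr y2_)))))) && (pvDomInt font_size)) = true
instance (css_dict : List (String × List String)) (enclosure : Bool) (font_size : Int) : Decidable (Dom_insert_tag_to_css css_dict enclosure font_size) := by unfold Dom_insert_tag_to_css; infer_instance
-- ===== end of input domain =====

-- B replaces A's three staged passes (index tuple of 'font-size' entries, in-place blanking,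
-- re-filter of blanks, append) by one structural recursion that builds the new 'p' list
-- back-to-front, seeding the tag at the base; both mutate css_dict['p'] in Python, the
-- equivalence proved here is about the return value.

-- ===== PORT A =====
def insert_tag_to_css (css_dict : List (String × List String)) (enclosure : Bool) (font_size : Int) : List (String × List String) :=
  if enclosure then css_dict
  else
    let d := PySem.Dict.mk css_dict
    if d.contains "p" then
      let p0 := d.getD "p" []
      let needed_indexes := (List.range p0.length).filter (fun x => PySem.Str.isIn "font-size" (p0.getD x ""))
      let p1 := needed_indexes.foldl (fun acc index => acc.set index "") p0
      let p2 := p1.filter (fun x => PySem.Str.strip x != "")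
      (d.insert "p" (p2 ++ ["font-size: " ++ PySem.Int.toStr font_size ++ "px;"])).items
    else
      (d.insert "p" ([] ++ ["font-size: " ++ PySem.Int.toStr font_size ++ "px;"])).items

-- ===== PORT B =====
-- rebuild: tag at the recursion base, surviving entries cons-prepended on the way out
def pvRebuild (tag : String) : List String → List String
  | [] => [tag]
  | head :: t =>
    let rest := pvRebuild tag t
    if PySem.Str.isIn "font-size" head || PySem.Str.strip head == "" then rest
    else head :: rest

def insert_tag_to_css_alt (css_dict : List (String × List String)) (enclosure : Bool) (font_size : Int) : List (String × List String) :=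
  if enclosure then css_dict
  else
    let d := PySem.Dict.mk css_dict
    (d.insert "p" (pvRebuild ("font-size: " ++ PySem.Int.toStr font_size ++ "px;") (d.getD "p" []))).items

-- ===== PRECONDITION & SPEC =====
def Spec_insert_tag_to_css (css_dict : List (String × List String)) (enclosure : Bool) (font_size : Int) (out : List (String × List String)) : Prop := out = insert_tag_to_css_alt css_dict enclosure font_size
instance (css_dict : List (String × List String)) (enclosure : Bool) (font_size : Int) (out : List (String × List String)) : Decidable (Spec_insert_tag_to_css css_dict enclosure font_size out) := by unfold Spec_insert_tag_to_css; infer_instance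

-- ===== CLAIM (what is proved, stated in full; the proofs are below) =====
def Claim_equal_insert_tag_to_css : Prop := ∀ (css_dict : List (String × List String)) (enclosure : Bool) (font_size : Int), Dom_insert_tag_to_css css_dict enclosure font_size → Spec_insert_tag_to_css css_dict enclosure font_size (insert_tag_to_css css_dict enclosure font_size)

-- ===== LEMMAS AND PROOFS =====

-- the blanking loop, read via getElem?
theorem foldl_set_getElem? (v : String) (l : List Nat) (p : List String) (j : Nat) :
    (l.foldl (fun acc i => acc.set i v) p)[j]? =
      if j ∈ l ∧ j < p.length then some v else p[j]? := by
  induction l generalizing p with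
  | nil => simp
  | cons i l ih =>
    simp only [List.foldl_cons, List.mem_cons]
    rw [ih]
    simp only [List.length_set, List.getElem?_set]
    by_cases hji : i = j
    · subst hji
      by_cases h : i < p.length
      · simp [h]
      · have hn : p[i]? = none := List.getElem?_eq_none_iff.mpr (by omega)
        simp [h]
    · have hji' : ¬ j = i := fun a => hji a.symm
      simp [hji, hji']

-- blanking the indices whose entry satisfies c is mapping over the entries
theorem foldl_set_eq_map (c : String → Bool) (p : List String) :
    ((List.range p.length).filter (fun x => c (p.getD x ""))).foldl
        (fun acc index => acc.set index "") p
      = p.map (fun x => if c x then "" else x) := by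
  apply List.ext_getElem?
  intro j
  rw [foldl_set_getElem?]
  by_cases hj : j < p.length
  · have hg : p[j]? = some p[j] := List.getElem?_eq_getElem hj
    have hd : p.getD j "" = p[j] := by simp [List.getD, hg]
    by_cases hc : c p[j] <;>
      simp [List.mem_filter, List.mem_range, hj, hc]
  · simp [List.mem_filter, List.mem_range, hj]

-- A's blank-then-filter composition, followed by the append, is B's recursion
theorem filter_map_blank_eq_rebuild (tag : String) (p : List String) :
    ((p.map (fun x => if PySem.Str.isIn "font-size" x then "" else x)).filter
        (fun x => PySem.Str.strip x != "")) ++ [tag]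
      = pvRebuild tag p := by
  induction p with
  | nil => rfl
  | cons a p ih =>
    simp only [List.map_cons, List.filter_cons, pvRebuild]
    by_cases hc : PySem.Str.isIn "font-size" a = true
    · have hcond : (PySem.Str.isIn "font-size" a || PySem.Str.strip a == "") = true := by
        rw [hc]; rfl
      rw [if_pos hc, hcond,
        if_neg (by decide : ¬ ((PySem.Str.strip "" != "") = true)), if_pos rfl]
      exact ih
    · rw [if_neg hc]
      by_cases hs : (PySem.Str.strip a == "") = true
      · have hcond : (PySem.Str.isIn "font-size" a || PySem.Str.strip a == "") = true := by
          rw [hs, Bool.or_true]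
        have hf : (PySem.Str.strip a != "") = false := by
          simp only [bne, hs, Bool.not_true]
        rw [hf, if_neg (by simp : ¬ (false = true)), hcond, if_pos rfl]
        exact ih
      · have hc' : PySem.Str.isIn "font-size" a = false := Bool.eq_false_iff.mpr hc
        have hs' : (PySem.Str.strip a == "") = false := Bool.eq_false_iff.mpr hs
        have hcond : (PySem.Str.isIn "font-size" a || PySem.Str.strip a == "") = false := by
          rw [hc', hs']; rfl
        have hf : (PySem.Str.strip a != "") = true := by
          simp only [bne, hs', Bool.not_false]
        rw [hf, if_pos rfl, hcond, if_neg (by simp : ¬ (false = true)), List.cons_append, ih]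

-- ===== VERDICT (by name: the statement is the Claim_ definition above) =====
theorem insert_tag_to_css_spec : Claim_equal_insert_tag_to_css := by
  intro css_dict enclosure font_size _
  unfold Spec_insert_tag_to_css insert_tag_to_css insert_tag_to_css_alt
  by_cases he : enclosure
  · simp [he]
  · simp only [he, if_false, Bool.false_eq_true]
    by_cases hp : (PySem.Dict.mk css_dict).contains "p"
    · simp only [hp, if_true]
      rw [foldl_set_eq_map, filter_map_blank_eq_rebuild]
    · have hc0 : (PySem.Dict.mk css_dict).contains "p" = false := Bool.eq_false_iff.mpr hp
      rw [PySem.Dict.getD_of_not_contains _ _ hc0]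
      simp [pvRebuild]
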